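-- pv_equiv track=rewrite | github.com/pypi-data/pypi-mirror-378 | packages/FreeDynamics-simaf/freedynamics_simaf-2.6.1.tar.gz/freedynamics_simaf-2.6.1/vacancy_predictor/core/batch_processor.py | _categorize_features
-- ===== SOURCE A (Python) =====
-- from typing import List, Dict, Any, Tuple, Optional, Callable
--
-- def _categorize_features(feature_cols: List[str]) -> Dict[str, List[str]]:
--     """Categorizar features por tipo"""
--     categories = {
--         'basic_stats': [],
--         'energy_features': [],
--         'stress_features': [],
--         'coordination_features': [],
--         'spatial_features': [],
--         'voronoi_features': [],
--         'advanced_features': [],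
--         'normalized_features': [],
--         'other': []
--     }
--
--     for col in feature_cols:
--         col_lower = col.lower()
--         categorized = False
--
--         if 'pe_' in col_lower or 'energy' in col_lower:
--             categories['energy_features'].append(col)
--             categorized = True
--         elif 'stress' in col_lower:
--             categories['stress_features'].append(col)
--             categorized = True
--         elif 'coord' in col_lower:
--             categories['coordination_features'].append(col)
--             categorized = True
--         elif any(x in col_lower for x in ['spatial', 'gyration', 'com_', 'moment']):
--             categories['spatial_features'].append(col)
--             categorized = True
--         elif 'voro' in col_lower:
--             categories['voronoi_features'].append(col)
--             categorized = True
--         elif col.endswith('_fixed') or '_norm' in col: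
--             categories['normalized_features'].append(col)
--             categorized = True
--         elif any(x in col_lower for x in ['coupling', 'disorder', 'instability', 'cohesion', 'proxy']):
--             categories['advanced_features'].append(col)
--             categorized = True
--         elif any(x in col for x in ['_mean', '_std', '_median', '_q25', '_q75']):
--             categories['basic_stats'].append(col)
--             categorized = True
--
--         if not categorized:
--             categories['other'].append(col)
--
--     # Filtrar categorías vacías
--     return {k: v for k, v in categories.items() if v}
-- ===== SOURCE B (Python) =====
-- def _categorize_features(feature_cols):
--     # Sieve: each stage partitions the remaining pool into its bucket and the rest,
--     # so later rules never even see already-claimed columns.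
--     def grab(pred, pool):
--         hit, miss = [], []
--         for c in pool:
--             if pred(c):
--                 hit.append(c)
--             else:
--                 miss.append(c)
--         return hit, miss
--
--     b = {}
--     rest = list(feature_cols)
--     b['energy_features'], rest = grab(lambda c: 'pe_' in c.lower() or 'energy' in c.lower(), rest)
--     b['stress_features'], rest = grab(lambda c: 'stress' in c.lower(), rest)
--     b['coordination_features'], rest = grab(lambda c: 'coord' in c.lower(), rest)
--     b['spatial_features'], rest = grab(lambda c: any(x in c.lower() for x in ('spatial', 'gyration', 'com_', 'moment')), rest)
--     b['voronoi_features'], rest = grab(lambda c: 'voro' in c.lower(), rest)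
--     b['normalized_features'], rest = grab(lambda c: c.endswith('_fixed') or '_norm' in c, rest)
--     b['advanced_features'], rest = grab(lambda c: any(x in c.lower() for x in ('coupling', 'disorder', 'instability', 'cohesion', 'proxy')), rest)
--     b['basic_stats'], rest = grab(lambda c: any(x in c for x in ('_mean', '_std', '_median', '_q25', '_q75')), rest)
--     b['other'] = rest
--
--     order = ['basic_stats', 'energy_features', 'stress_features', 'coordination_features',
--              'spatial_features', 'voronoi_features', 'advanced_features', 'normalized_features', 'other']
--     return {k: b[k] for k in order if b[k]}
-- ===== Notes on version B (the rewrite author's own statement) =====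
-- stated objective: alternative
-- what changed: A's single per-column pass through a nine-branch if/elif chain appending into a pre-seeded dict is replaced by a sieve of staged partition passes: each keyword rule partitions the remaining pool into its bucket and the rest, so later rules never see already-claimed columns, and the leftover pool becomes 'other'.
import Mathlib
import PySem

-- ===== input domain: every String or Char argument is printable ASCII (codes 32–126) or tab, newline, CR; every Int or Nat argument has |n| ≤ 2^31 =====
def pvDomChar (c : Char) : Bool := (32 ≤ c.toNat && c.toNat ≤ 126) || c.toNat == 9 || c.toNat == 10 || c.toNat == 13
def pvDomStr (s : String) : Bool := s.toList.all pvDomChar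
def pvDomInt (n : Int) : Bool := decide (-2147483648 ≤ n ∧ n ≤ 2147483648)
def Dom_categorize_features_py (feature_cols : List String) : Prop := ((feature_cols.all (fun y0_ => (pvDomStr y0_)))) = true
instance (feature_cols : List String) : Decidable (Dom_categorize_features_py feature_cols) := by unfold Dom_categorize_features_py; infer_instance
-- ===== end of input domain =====

-- B replaces A's per-column if/elif classification pass by a sieve of staged
-- partition passes (each rule splits the remaining pool into its bucket and the rest);
-- objective: alternative decomposition, same results.

-- the eight keyword predicates, shared verbatim by both ports' sources
def pEnergy (c : String) : Bool := PySem.Str.isIn "pe_" (PySem.Str.lower c) || PySem.Str.isIn "energy" (PySem.Str.lower c)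
def pStress (c : String) : Bool := PySem.Str.isIn "stress" (PySem.Str.lower c)
def pCoord (c : String) : Bool := PySem.Str.isIn "coord" (PySem.Str.lower c)
def pSpatial (c : String) : Bool := ["spatial", "gyration", "com_", "moment"].any (fun x => PySem.Str.isIn x (PySem.Str.lower c))
def pVoro (c : String) : Bool := PySem.Str.isIn "voro" (PySem.Str.lower c)
def pNorm (c : String) : Bool := PySem.Str.endswith c "_fixed" || PySem.Str.isIn "_norm" c
def pAdv (c : String) : Bool := ["coupling", "disorder", "instability", "cohesion", "proxy"].any (fun x => PySem.Str.isIn x (PySem.Str.lower c))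
def pBasic (c : String) : Bool := ["_mean", "_std", "_median", "_q25", "_q75"].any (fun x => PySem.Str.isIn x c)

-- ===== PORT A =====
-- one loop iteration of A's for-loop: the if/elif chain appending col to one category list
def pyAStep (d : PySem.Dict String (List String)) (col : String) : PySem.Dict String (List String) :=
  if pEnergy col then d.modify "energy_features" [] (· ++ [col])
  else if pStress col then d.modify "stress_features" [] (· ++ [col])
  else if pCoord col then d.modify "coordination_features" [] (· ++ [col])
  else if pSpatial col then d.modify "spatial_features" [] (· ++ [col])
  else if pVoro col then d.modify "voronoi_features" [] (· ++ [col])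
  else if pNorm col then d.modify "normalized_features" [] (· ++ [col])
  else if pAdv col then d.modify "advanced_features" [] (· ++ [col])
  else if pBasic col then d.modify "basic_stats" [] (· ++ [col])
  else  -- 'if not categorized' at the bottom of A's loop body
    d.modify "other" [] (· ++ [col])

def categorize_features_py (feature_cols : List String) : List (String × List String) :=
  let categories : PySem.Dict String (List String) := PySem.Dict.ofList
    [("basic_stats", []), ("energy_features", []), ("stress_features", []),
     ("coordination_features", []), ("spatial_features", []), ("voronoi_features", []),
     ("advanced_features", []), ("normalized_features", []), ("other", [])]
  let categories := feature_cols.foldl pyAStep categories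
  -- {k: v for k, v in categories.items() if v}
  categories.items.filter (fun p => !p.2.isEmpty)

-- ===== PORT B =====
-- Source B's 'grab': one pass over the pool splitting it into (matching, rest)
def pyGrab (pred : String → Bool) (pool : List String) : List String × List String :=
  pool.foldl (fun acc c => if pred c then (acc.1 ++ [c], acc.2) else (acc.1, acc.2 ++ [c])) ([], [])

def categorize_features_py_alt (feature_cols : List String) : List (String × List String) :=
  let (energy, rest1) := pyGrab pEnergy feature_cols
  let (stress, rest2) := pyGrab pStress rest1
  let (coord, rest3) := pyGrab pCoord rest2
  let (spatial, rest4) := pyGrab pSpatial rest3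
  let (voro, rest5) := pyGrab pVoro rest4
  let (norm, rest6) := pyGrab pNorm rest5
  let (adv, rest7) := pyGrab pAdv rest6
  let (basic, other) := pyGrab pBasic rest7
  -- {k: b[k] for k in order if b[k]}
  ([("basic_stats", basic), ("energy_features", energy), ("stress_features", stress),
    ("coordination_features", coord), ("spatial_features", spatial), ("voronoi_features", voro),
    ("advanced_features", adv), ("normalized_features", norm), ("other", other)]).filter
    (fun p => !p.2.isEmpty)

-- ===== PRECONDITION & SPEC =====
def Spec_categorize_features_py (feature_cols : List String) (out : List (String × List String)) : Prop := out = categorize_features_py_alt feature_cols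
instance (feature_cols : List String) (out : List (String × List String)) : Decidable (Spec_categorize_features_py feature_cols out) := by unfold Spec_categorize_features_py; infer_instance

-- ===== CLAIM (what is proved, stated in full; the proofs are below) =====
def Claim_equal_categorize_features_py : Prop := ∀ (feature_cols : List String), Dom_categorize_features_py feature_cols → Spec_categorize_features_py feature_cols (categorize_features_py feature_cols)

-- ===== LEMMAS AND PROOFS =====

-- the category A's if/elif chain assigns to a column, as a standalone function
def pyCat (col : String) : String :=
  if pEnergy col then "energy_features"
  else if pStress col then "stress_features"
  else if pCoord col then "coordination_features"
  else if pSpatial col then "spatial_features"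
  else if pVoro col then "voronoi_features"
  else if pNorm col then "normalized_features"
  else if pAdv col then "advanced_features"
  else if pBasic col then "basic_stats"
  else "other"

lemma pyAStep_eq_modify (d : PySem.Dict String (List String)) (col : String) :
    pyAStep d col = d.modify (pyCat col) [] (· ++ [col]) := by
  simp only [pyAStep, pyCat]
  split_ifs <;> rfl

lemma pyCat_cases (col : String) :
    pyCat col = "basic_stats" ∨ pyCat col = "energy_features" ∨ pyCat col = "stress_features" ∨
    pyCat col = "coordination_features" ∨ pyCat col = "spatial_features" ∨ pyCat col = "voronoi_features" ∨
    pyCat col = "advanced_features" ∨ pyCat col = "normalized_features" ∨ pyCat col = "other" := by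
  unfold pyCat; split_ifs <;> simp

lemma catA_inv (cols : List String) : ∀ v1 v2 v3 v4 v5 v6 v7 v8 v9 : List String,
    List.foldl pyAStep (PySem.Dict.mk
      [("basic_stats", v1), ("energy_features", v2), ("stress_features", v3),
       ("coordination_features", v4), ("spatial_features", v5), ("voronoi_features", v6),
       ("advanced_features", v7), ("normalized_features", v8), ("other", v9)]) cols
    = PySem.Dict.mk
      [("basic_stats", v1 ++ cols.filter (fun c => pyCat c == "basic_stats")),
       ("energy_features", v2 ++ cols.filter (fun c => pyCat c == "energy_features")),
       ("stress_features", v3 ++ cols.filter (fun c => pyCat c == "stress_features")),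
       ("coordination_features", v4 ++ cols.filter (fun c => pyCat c == "coordination_features")),
       ("spatial_features", v5 ++ cols.filter (fun c => pyCat c == "spatial_features")),
       ("voronoi_features", v6 ++ cols.filter (fun c => pyCat c == "voronoi_features")),
       ("advanced_features", v7 ++ cols.filter (fun c => pyCat c == "advanced_features")),
       ("normalized_features", v8 ++ cols.filter (fun c => pyCat c == "normalized_features")),
       ("other", v9 ++ cols.filter (fun c => pyCat c == "other"))] := by
  induction cols with
  | nil => intro _ _ _ _ _ _ _ _ _; simp
  | cons col rest ih =>
    intro v1 v2 v3 v4 v5 v6 v7 v8 v9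
    rw [List.foldl_cons, pyAStep_eq_modify]
    rcases pyCat_cases col with h | h | h | h | h | h | h | h | h <;>
      (rw [h]
       simp [PySem.Dict.modify, PySem.Dict.contains, PySem.Dict.getD, PySem.Dict.get?,
         PySem.Dict.insert, List.find?]
       rw [ih]
       simp [h])

-- the sieve stage computes (filter pred, filter ¬pred) of its pool
lemma pyGrab_eq (pred : String → Bool) (pool : List String) :
    pyGrab pred pool = (pool.filter pred, pool.filter (fun c => !pred c)) := by
  suffices h : ∀ h0 m0 : List String,
      pool.foldl (fun acc c => if pred c then (acc.1 ++ [c], acc.2) else (acc.1, acc.2 ++ [c])) (h0, m0)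
        = (h0 ++ pool.filter pred, m0 ++ pool.filter (fun c => !pred c)) by
    simpa [pyGrab] using h [] []
  induction pool with
  | nil => simp
  | cons c cs ih =>
    intro h0 m0
    by_cases hc : pred c = true <;> simp [hc, ih]

set_option maxHeartbeats 1600000 in
theorem claim_aux (cols : List String) :
    categorize_features_py cols = categorize_features_py_alt cols := by
  have hd0 : (PySem.Dict.ofList
      [("basic_stats", ([] : List String)), ("energy_features", []), ("stress_features", []),
       ("coordination_features", []), ("spatial_features", []), ("voronoi_features", []),
       ("advanced_features", []), ("normalized_features", []), ("other", [])]) = PySem.Dict.mk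
      [("basic_stats", []), ("energy_features", []), ("stress_features", []),
       ("coordination_features", []), ("spatial_features", []), ("voronoi_features", []),
       ("advanced_features", []), ("normalized_features", []), ("other", [])] := by decide
  have hcg : ∀ (s : String) (q : String → Bool),
      (∀ c, q c = (pyCat c == s)) → cols.filter q = cols.filter (fun c => pyCat c == s) :=
    fun s q h => List.filter_congr (fun c _ => h c)
  have h1 := hcg "energy_features" pEnergy (fun c => by unfold pyCat; split_ifs <;> simp_all)
  have h2 := hcg "stress_features" (fun c => pStress c && !pEnergy c)
    (fun c => by unfold pyCat; split_ifs <;> simp_all)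
  have h3 := hcg "coordination_features" (fun c => pCoord c && (!pStress c && !pEnergy c))
    (fun c => by unfold pyCat; split_ifs <;> simp_all)
  have h4 := hcg "spatial_features" (fun c => pSpatial c && (!pCoord c && (!pStress c && !pEnergy c)))
    (fun c => by unfold pyCat; split_ifs <;> simp_all)
  have h5 := hcg "voronoi_features" (fun c => pVoro c && (!pSpatial c && (!pCoord c && (!pStress c && !pEnergy c))))
    (fun c => by unfold pyCat; split_ifs <;> simp_all)
  have h6 := hcg "normalized_features" (fun c => pNorm c && (!pVoro c && (!pSpatial c && (!pCoord c && (!pStress c && !pEnergy c)))))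
    (fun c => by unfold pyCat; split_ifs <;> simp_all)
  have h7 := hcg "advanced_features" (fun c => pAdv c && (!pNorm c && (!pVoro c && (!pSpatial c && (!pCoord c && (!pStress c && !pEnergy c))))))
    (fun c => by unfold pyCat; split_ifs <;> simp_all)
  have h8 := hcg "basic_stats" (fun c => pBasic c && (!pAdv c && (!pNorm c && (!pVoro c && (!pSpatial c && (!pCoord c && (!pStress c && !pEnergy c)))))))
    (fun c => by unfold pyCat; split_ifs <;> simp_all)
  have h9 := hcg "other" (fun c => !pBasic c && (!pAdv c && (!pNorm c && (!pVoro c && (!pSpatial c && (!pCoord c && (!pStress c && !pEnergy c)))))))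
    (fun c => by unfold pyCat; split_ifs <;> simp_all)
  simp only [categorize_features_py, categorize_features_py_alt]
  rw [hd0, catA_inv]
  simp only [pyGrab_eq, List.filter_filter, List.nil_append]
  rw [h1, h2, h3, h4, h5, h6, h7, h8, h9]

-- ===== VERDICT (by name: the statement is the Claim_ definition above) =====
theorem categorize_features_py_spec : Claim_equal_categorize_features_py := by
  intro feature_cols _
  exact claim_aux feature_cols
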